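-- pv_equiv track=rewrite | github.com/erimcakir123/polymarket-agent | scripts/score_exit_sim.py | mlb_score_exit
-- ===== SOURCE A (Python) =====
-- def mlb_score_exit(hls, als, our_home):
--     max_i = max(len(hls), len(als))
--     for i in range(max_i):
--         ot = sum(hls[:i+1]) if our_home else sum(als[:i+1])
--         pt = sum(als[:i+1]) if our_home else sum(hls[:i+1])
--         deficit = pt - ot
--         inning = i + 1
--         if inning >= 7 and deficit >= 5: return True, inning, deficit
--         if inning >= 8 and deficit >= 3: return True, inning, deficit
--         if inning >= 9 and deficit >= 1: return True, inning, deficit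
--     return False, None, 0
-- ===== SOURCE B (Python) =====
-- def mlb_score_exit(hls, als, our_home):
--     ch = 0
--     ca = 0
--     for i in range(max(len(hls), len(als))):
--         ch += hls[i] if i < len(hls) else 0
--         ca += als[i] if i < len(als) else 0
--         deficit = (ca - ch) if our_home else (ch - ca)
--         inning = i + 1
--         if inning >= 7:
--             thr = 5 if inning == 7 else (3 if inning == 8 else 1)
--             if deficit >= thr:
--                 return True, inning, deficit
--     return False, None, 0
-- ===== Notes on version B (the rewrite author's own statement) =====
-- stated objective: faster
-- what changed: B keeps running cumulative scores in a single pass (with a per-inning threshold table) instead of re-slicing and summing both score lists on every iteration.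
import Mathlib
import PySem

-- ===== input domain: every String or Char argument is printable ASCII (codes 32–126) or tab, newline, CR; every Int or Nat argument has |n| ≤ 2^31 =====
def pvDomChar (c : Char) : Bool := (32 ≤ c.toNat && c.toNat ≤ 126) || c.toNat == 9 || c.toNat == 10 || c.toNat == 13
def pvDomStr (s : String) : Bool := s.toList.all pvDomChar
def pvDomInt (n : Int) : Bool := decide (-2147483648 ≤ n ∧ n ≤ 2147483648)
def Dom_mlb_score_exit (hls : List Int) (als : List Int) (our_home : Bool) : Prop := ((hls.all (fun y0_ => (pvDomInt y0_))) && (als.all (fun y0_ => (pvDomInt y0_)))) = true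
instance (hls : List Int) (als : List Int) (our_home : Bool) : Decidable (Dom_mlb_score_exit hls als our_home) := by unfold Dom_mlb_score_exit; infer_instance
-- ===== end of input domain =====

-- B replaces A's per-inning list re-slicing/summing (O(n^2)) by running cumulative scores in one pass (O(n)); objective: faster.

-- ===== PORT A =====
-- the 'for i in range(max_i)' loop of A, with early returns; i = current index, rem = iterations left
def mlbA_loop (hls als : List Int) (our_home : Bool) (i : Nat) (rem : Nat) : Bool × Option Int × Int :=
  match rem with
  | 0 => (false, none, 0)
  | rem + 1 =>
    let ot : Int := if our_home then (PySem.List.slice hls none (some ((i : Int) + 1))).sum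
                    else (PySem.List.slice als none (some ((i : Int) + 1))).sum
    let pt : Int := if our_home then (PySem.List.slice als none (some ((i : Int) + 1))).sum
                    else (PySem.List.slice hls none (some ((i : Int) + 1))).sum
    let deficit := pt - ot
    let inning : Int := (i : Int) + 1
    if inning ≥ 7 ∧ deficit ≥ 5 then (true, some inning, deficit)
    else if inning ≥ 8 ∧ deficit ≥ 3 then (true, some inning, deficit)
    else if inning ≥ 9 ∧ deficit ≥ 1 then (true, some inning, deficit)
    else mlbA_loop hls als our_home (i + 1) rem

def mlb_score_exit (hls : List Int) (als : List Int) (our_home : Bool) : Bool × Option Int × Int :=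
  mlbA_loop hls als our_home 0 (max hls.length als.length)

-- ===== PORT B =====
-- B's single pass with running cumulative scores ch/ca and a per-inning threshold
def mlbB_loop (hls als : List Int) (our_home : Bool) (i : Nat) (rem : Nat) (ch ca : Int) : Bool × Option Int × Int :=
  match rem with
  | 0 => (false, none, 0)
  | rem + 1 =>
    let ch' := ch + (if i < hls.length then hls.getD i 0 else 0)
    let ca' := ca + (if i < als.length then als.getD i 0 else 0)
    let deficit := if our_home then ca' - ch' else ch' - ca'
    let inning : Int := (i : Int) + 1
    if inning ≥ 7 then
      let thr : Int := if inning = 7 then 5 else if inning = 8 then 3 else 1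
      if deficit ≥ thr then (true, some inning, deficit)
      else mlbB_loop hls als our_home (i + 1) rem ch' ca'
    else mlbB_loop hls als our_home (i + 1) rem ch' ca'

def mlb_score_exit_alt (hls : List Int) (als : List Int) (our_home : Bool) : Bool × Option Int × Int :=
  mlbB_loop hls als our_home 0 (max hls.length als.length) 0 0

-- ===== PRECONDITION & SPEC =====
def Spec_mlb_score_exit (hls : List Int) (als : List Int) (our_home : Bool) (out : Bool × Option Int × Int) : Prop := out = mlb_score_exit_alt hls als our_home
instance (hls : List Int) (als : List Int) (our_home : Bool) (out : Bool × Option Int × Int) : Decidable (Spec_mlb_score_exit hls als our_home out) := by unfold Spec_mlb_score_exit; infer_instance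

-- ===== CLAIM (what is proved, stated in full; the proofs are below) =====
def Claim_equal_mlb_score_exit : Prop := ∀ (hls : List Int) (als : List Int) (our_home : Bool), Dom_mlb_score_exit hls als our_home → Spec_mlb_score_exit hls als our_home (mlb_score_exit hls als our_home)

-- ===== LEMMAS AND PROOFS =====

theorem pv_take_succ_sum (l : List Int) (i : Nat) :
    (l.take (i + 1)).sum = (l.take i).sum + (if i < l.length then l.getD i 0 else 0) := by
  induction l generalizing i with
  | nil => simp
  | cons x xs ih =>
    cases i with
    | zero => simp
    | succ j =>
      simp only [List.take_succ_cons, List.sum_cons, List.length_cons, List.getD_cons_succ]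
      rw [ih j]
      have : j + 1 < xs.length + 1 ↔ j < xs.length := by omega
      simp [this]; ring

theorem pv_slice_take (l : List Int) (i : Nat) :
    PySem.List.slice l none (some ((i : Int) + 1)) = l.take (i + 1) := by
  have : ((i : Int) + 1) = ((i + 1 : Nat) : Int) := by push_cast; ring
  rw [this, PySem.List.slice_to_natCast]

theorem pv_loop_eq (hls als : List Int) (oh : Bool) :
    ∀ (rem i : Nat) (ch ca : Int), ch = (hls.take i).sum → ca = (als.take i).sum →
      mlbA_loop hls als oh i rem = mlbB_loop hls als oh i rem ch ca := by
  intro rem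
  induction rem with
  | zero => intro i ch ca _ _; rfl
  | succ rem ih =>
    intro i ch ca hch hca
    simp only [mlbA_loop, mlbB_loop, pv_slice_take, pv_take_succ_sum, hch, hca]
    generalize hdh : (if i < hls.length then hls.getD i 0 else 0) = dh
    generalize hda : (if i < als.length then als.getD i 0 else 0) = da
    have hrec : mlbA_loop hls als oh (i + 1) rem
        = mlbB_loop hls als oh (i + 1) rem ((hls.take i).sum + dh) ((als.take i).sum + da) := by
      apply ih
      · rw [← hdh, ← pv_take_succ_sum]
      · rw [← hda, ← pv_take_succ_sum]
    cases oh <;>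
      simp only [Bool.false_eq_true, if_true, if_false] <;>
      split_ifs <;> first | rfl | (exact hrec) | omega

-- ===== VERDICT (by name: the statement is the Claim_ definition above) =====
theorem mlb_score_exit_spec : Claim_equal_mlb_score_exit := by
  intro hls als oh _
  unfold Spec_mlb_score_exit mlb_score_exit mlb_score_exit_alt
  exact pv_loop_eq hls als oh _ 0 0 0 (by simp) (by simp)
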